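-- pv_equiv track=rewrite | github.com/Carson7822/Python-Fundamentals-CSE174 | Lectures,Tests,Etc/problem_solving.py | pre4
-- ===== SOURCE A (Python) =====
-- def pre4(numbers : list) -> list:
--     lst = []
--
--     for i in range(len(numbers)):
--         if numbers[i] == 4:
--             return lst
--         else:
--             lst.append(numbers[i])
--
--     return numbers  # Temporary return
-- ===== SOURCE B (Python) =====
-- def pre4(numbers: list) -> list:
--     if 4 in numbers:
--         return numbers[:numbers.index(4)]
--     return numbers
-- ===== Notes on version B (the rewrite author's own statement) =====
-- stated objective: simpler
-- what changed: Replaces the element-by-element accumulation loop with a membership test plus index/slice (C-level primitives): find the first-4 boundary and slice the prefix; returns the list itself when no 4 is present.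
import Mathlib
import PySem

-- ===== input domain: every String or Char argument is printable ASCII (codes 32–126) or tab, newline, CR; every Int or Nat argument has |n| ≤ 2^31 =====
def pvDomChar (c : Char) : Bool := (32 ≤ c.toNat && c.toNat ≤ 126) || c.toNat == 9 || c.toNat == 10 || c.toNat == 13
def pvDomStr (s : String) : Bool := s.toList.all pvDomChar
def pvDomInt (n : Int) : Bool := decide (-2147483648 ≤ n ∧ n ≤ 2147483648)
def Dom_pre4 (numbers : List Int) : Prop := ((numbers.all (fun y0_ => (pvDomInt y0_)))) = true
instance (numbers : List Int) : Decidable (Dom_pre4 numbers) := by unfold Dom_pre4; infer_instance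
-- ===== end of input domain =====

-- B replaces A's append-one-by-one loop with a membership test and a prefix slice; objective: simpler.


-- ===== PORT A =====
-- loop 'for i in range(len(numbers))' with accumulator lst and early return; reaching the end returns numbers itself
def pre4Go (numbers : List Int) (lst : List Int) (rest : List Int) : List Int :=
  match rest with
  | [] => numbers
  | x :: xs => if x = 4 then lst else pre4Go numbers (lst ++ [x]) xs

def pre4 (numbers : List Int) : List Int := pre4Go numbers [] numbers

-- ===== PORT B =====
def pre4_alt (numbers : List Int) : List Int :=
  if 4 ∈ numbers then
    match PySem.List.index? numbers 4 with
    | some i => PySem.List.slice numbers none (some (i : Int))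
    | none => numbers
  else numbers

-- ===== PRECONDITION & SPEC =====
def Spec_pre4 (numbers : List Int) (out : List Int) : Prop := out = pre4_alt numbers
instance (numbers : List Int) (out : List Int) : Decidable (Spec_pre4 numbers out) := by unfold Spec_pre4; infer_instance

-- ===== CLAIM (what is proved, stated in full; the proofs are below) =====
def Claim_equal_pre4 : Prop := ∀ (numbers : List Int), Dom_pre4 numbers → Spec_pre4 numbers (pre4 numbers)

-- ===== LEMMAS AND PROOFS =====

-- A's loop: if 4 ∈ rest it returns lst ++ (prefix of rest before the first 4); else it returns numbers.
theorem pre4Go_mem (numbers lst rest : List Int) (h : 4 ∈ rest) :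
    pre4Go numbers lst rest = lst ++ rest.take (rest.idxOf 4) := by
  induction rest generalizing lst with
  | nil => cases h
  | cons x xs ih =>
    by_cases hx : x = 4
    · subst hx; simp [pre4Go, List.idxOf_cons_self]
    · have hm : 4 ∈ xs := by cases List.mem_cons.mp h with
        | inl h' => exact absurd h'.symm hx
        | inr h' => exact h'
      simp [pre4Go, hx, ih _ hm, List.take_succ_cons]

theorem pre4Go_not_mem (numbers lst rest : List Int) (h : 4 ∉ rest) :
    pre4Go numbers lst rest = numbers := by
  induction rest generalizing lst with
  | nil => rfl
  | cons x xs ih =>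
    have hx : x ≠ 4 := fun h' => h (h' ▸ List.mem_cons_self)
    simp [pre4Go, hx, ih _ (fun h' => h (List.mem_cons_of_mem _ h'))]

-- ===== VERDICT (by name: the statement is the Claim_ definition above) =====
theorem pre4_spec : Claim_equal_pre4 := by
  intro numbers _
  unfold Spec_pre4 pre4 pre4_alt
  by_cases h : (4 : Int) ∈ numbers
  · have hs : (PySem.List.index? numbers 4).isSome := (PySem.List.index?_isSome_iff numbers 4).mpr h
    obtain ⟨i, hi⟩ := Option.isSome_iff_exists.mp hs
    have hio : numbers.idxOf 4 = i := by
      rw [List.idxOf_eq_getD_idxOf?]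
      rw [PySem.List.index?_eq_idxOf?] at hi
      simp [hi]
    have hidx : PySem.List.index? numbers 4 = some (numbers.idxOf 4) := by rw [hio]; exact hi
    simp only [h, if_pos, hidx, pre4Go_mem numbers [] numbers h, List.nil_append,
      PySem.List.slice_to_natCast]
  · simp [h, pre4Go_not_mem numbers [] numbers h]
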